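-- pv_equiv track=rewrite | github.com/DougF-5749/Coding_Katas | katas/list_manipulations.py | one_hundred_sum_array
-- ===== SOURCE A (Python) =====
-- def one_hundred_sum_array(array):
-- # RECURSIVE - O(N^2)
--     # if len(array) < 2:
--     #     return False
--     # if array[0] + array[-1] == 100:
--     #     return True
--     # return one_hundred_sum_array(array[1:-1])
-- # NON-RECURSIVE time analysis: N/2 -> O(N)
--     left_index = 0
--     right_index = len(array) - 1
--
--     while left_index < (len(array) / 2):
--         if array[left_index] + array[right_index] != 100:
--             return False
--         left_index += 1
--         right_index -= 1
--
--     return True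
-- ===== SOURCE B (Python) =====
-- def one_hundred_sum_array(array):
--     if not array:
--         return True
--     if len(array) == 1:
--         return array[0] + array[0] == 100
--     if array[0] + array[-1] != 100:
--         return False
--     return one_hundred_sum_array(array[1:-1])
-- ===== Notes on version B (the rewrite author's own statement) =====
-- stated objective: alternative
-- what changed: Replaced the two-index while loop with a recursion that checks the outer pair and recurses on the inner slice array[1:-1], with base cases empty->True and singleton->self-pair check.
import Mathlib
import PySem

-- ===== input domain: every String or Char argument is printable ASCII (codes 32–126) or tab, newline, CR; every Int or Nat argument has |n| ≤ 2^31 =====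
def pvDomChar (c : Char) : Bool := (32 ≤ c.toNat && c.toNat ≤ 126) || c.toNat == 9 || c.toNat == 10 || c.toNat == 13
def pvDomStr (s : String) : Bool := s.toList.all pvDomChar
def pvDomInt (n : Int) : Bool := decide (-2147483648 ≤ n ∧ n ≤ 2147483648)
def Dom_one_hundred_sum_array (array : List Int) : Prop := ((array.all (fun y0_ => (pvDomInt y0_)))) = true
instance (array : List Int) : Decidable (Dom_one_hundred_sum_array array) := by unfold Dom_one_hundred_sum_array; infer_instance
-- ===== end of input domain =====

-- B replaces A's two-index while loop by the recursion the author sketched: check the outer pair, recurse on array[1:-1]; same return value.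
-- ===== PORT A =====
-- while left_index < len(array)/2: Python's real-number test 'left < n/2' on ints is exactly '2*left < n'.
-- array[left]/array[right] are always in range when the loop body runs (from the call below); pyGetD's default 0 is never used.
def pvALoop (array : List Int) (left right : Int) : Bool :=
  if 2 * left < (array.length : Int) then
    if PySem.List.pyGetD array left 0 + PySem.List.pyGetD array right 0 ≠ 100 then false
    else pvALoop array (left + 1) (right - 1)
  else true
termination_by ((array.length : Int) - 2 * left).toNat
decreasing_by simp at *; omega

def one_hundred_sum_array (array : List Int) : Bool :=
  pvALoop array 0 ((array.length : Int) - 1)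

-- ===== PORT B =====
def one_hundred_sum_array_alt : List Int → Bool
  | [] => true
  | [x] => x + x == 100
  | x :: y :: rest =>
    if x + (y :: rest).getLast (by simp) ≠ 100 then false
    else one_hundred_sum_array_alt ((y :: rest).dropLast)
termination_by a => a.length
decreasing_by simp [List.length_dropLast]

-- ===== PRECONDITION & SPEC =====
def Spec_one_hundred_sum_array (array : List Int) (out : Bool) : Prop := out = one_hundred_sum_array_alt array
instance (array : List Int) (out : Bool) : Decidable (Spec_one_hundred_sum_array array out) := by unfold Spec_one_hundred_sum_array; infer_instance

-- ===== CLAIM (what is proved, stated in full; the proofs are below) =====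
def Claim_equal_one_hundred_sum_array : Prop := ∀ (array : List Int), Dom_one_hundred_sum_array array → Spec_one_hundred_sum_array array (one_hundred_sum_array array)

-- ===== LEMMAS AND PROOFS =====

-- ===== LEMMAS AND PROOFS =====
lemma pvMidGet (x l : Int) (ys : List Int) (i : Int) (h0 : 0 ≤ i) (h1 : i < (ys.length : Int)) :
    PySem.List.pyGetD (x :: ys ++ [l]) (i + 1) 0 = PySem.List.pyGetD ys i 0 := by
  rw [PySem.List.pyGetD_eq_getElem _ _ (by omega) (by simp; omega),
      PySem.List.pyGetD_eq_getElem _ _ h0 (by simpa using h1)]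
  have ht : (i + 1).toNat = i.toNat + 1 := by omega
  have hlt : i.toNat < ys.length := by omega
  simp [ht, List.getElem_cons_succ, List.getElem_append_left hlt]

lemma pvLastGet (x l : Int) (ys : List Int) :
    PySem.List.pyGetD (x :: ys ++ [l]) ((ys.length : Int) + 1) 0 = l := by
  rw [PySem.List.pyGetD_eq_getElem _ _ (by omega) (by simp)]
  have ht : ((ys.length : Int) + 1).toNat = ys.length + 1 := by omega
  simp [ht]

lemma pvALoop_shrink (x l : Int) (ys : List Int) : ∀ (fuel : Nat) (left : Int), 0 ≤ left →
    (((ys.length : Int) - 2 * left).toNat ≤ fuel) →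
    pvALoop (x :: ys ++ [l]) (left + 1) (((x :: ys ++ [l]).length : Int) - 1 - (left + 1))
      = pvALoop ys left ((ys.length : Int) - 1 - left) := by
  intro fuel
  induction fuel with
  | zero =>
    intro left h0 hf
    conv_lhs => rw [pvALoop.eq_def]
    conv_rhs => rw [pvALoop.eq_def]
    have h1 : ¬ (2 * (left + 1) < ((x :: ys ++ [l]).length : Int)) := by simp; omega
    have h2 : ¬ (2 * left < (ys.length : Int)) := by omega
    rw [if_neg h1, if_neg h2]
  | succ f ih =>
    intro left h0 hf
    conv_lhs => rw [pvALoop.eq_def]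
    conv_rhs => rw [pvALoop.eq_def]
    by_cases hc : 2 * left < (ys.length : Int)
    · have hc' : 2 * (left + 1) < ((x :: ys ++ [l]).length : Int) := by simp; omega
      rw [if_pos hc, if_pos hc']
      have e1 : PySem.List.pyGetD (x :: ys ++ [l]) (left + 1) 0 = PySem.List.pyGetD ys left 0 :=
        pvMidGet x l ys left h0 (by omega)
      have e2 : (((x :: ys ++ [l]).length : Int) - 1 - (left + 1)) = ((ys.length : Int) - 1 - left) + 1 := by
        simp; omega
      have e3 : PySem.List.pyGetD (x :: ys ++ [l]) (((x :: ys ++ [l]).length : Int) - 1 - (left + 1)) 0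
          = PySem.List.pyGetD ys ((ys.length : Int) - 1 - left) 0 := by
        rw [e2]; exact pvMidGet x l ys _ (by omega) (by omega)
      rw [e1, e3]
      by_cases hs : PySem.List.pyGetD ys left 0 + PySem.List.pyGetD ys ((ys.length : Int) - 1 - left) 0 ≠ 100
      · rw [if_pos hs, if_pos hs]
      · rw [if_neg hs, if_neg hs]
        have e4 : (((x :: ys ++ [l]).length : Int) - 1 - (left + 1)) - 1
            = ((x :: ys ++ [l]).length : Int) - 1 - (left + 1 + 1) := by ring
        have e5 : ((ys.length : Int) - 1 - left) - 1 = (ys.length : Int) - 1 - (left + 1) := by ring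
        rw [e4, e5]
        exact ih (left + 1) (by omega) (by omega)
    · have hc' : ¬ (2 * (left + 1) < ((x :: ys ++ [l]).length : Int)) := by simp; omega
      rw [if_neg hc, if_neg hc']

lemma pvMain : ∀ (array : List Int), one_hundred_sum_array array = one_hundred_sum_array_alt array
  | [] => by
    rw [one_hundred_sum_array, one_hundred_sum_array_alt, pvALoop]
    norm_num
  | [x] => by
    rw [one_hundred_sum_array, one_hundred_sum_array_alt, pvALoop]
    norm_num
    by_cases h : x + x = 100
    · simp [h, pvALoop]
    · simp [h, pvALoop]
  | x :: y :: rest => by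
    have hne : (y :: rest) ≠ [] := by simp
    obtain ⟨ys, l, hdec⟩ : ∃ ys l, y :: rest = ys ++ [l] :=
      ⟨(y :: rest).dropLast, (y :: rest).getLast hne, (List.dropLast_append_getLast hne).symm⟩
    have hlast : ∀ h, (y :: rest).getLast h = l := by
      intro h
      have h2 : (y :: rest).getLast? = some l := by rw [hdec]; simp
      have h3 := (List.getLast?_eq_some_getLast h).symm.trans h2
      exact Option.some_injective _ h3
    have hdrop : (y :: rest).dropLast = ys := by rw [hdec]; simp
    have IH := pvMain ((y :: rest).dropLast)
    rw [hdrop] at IH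
    rw [one_hundred_sum_array, one_hundred_sum_array_alt, hlast, hdrop, hdec]
    rw [show x :: (ys ++ [l]) = x :: ys ++ [l] from (List.cons_append).symm]
    conv_lhs => rw [pvALoop.eq_def]
    have hcond : 2 * 0 < ((x :: ys ++ [l]).length : Int) := by simp; omega
    rw [if_pos hcond]
    have e0 : PySem.List.pyGetD (x :: ys ++ [l]) 0 0 = x := PySem.List.pyGetD_zero_cons _ _ _
    have e1 : ((x :: ys ++ [l]).length : Int) - 1 = (ys.length : Int) + 1 := by
      simp
    have e2 : PySem.List.pyGetD (x :: ys ++ [l]) (((x :: ys ++ [l]).length : Int) - 1) 0 = l := by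
      rw [e1]; exact pvLastGet x l ys
    rw [e0, e2]
    by_cases hs : x + l ≠ 100
    · rw [if_pos hs, if_pos hs]
    · rw [if_neg hs, if_neg hs]
      have e3 : ((x :: ys ++ [l]).length : Int) - 1 - 1 = ((x :: ys ++ [l]).length : Int) - 1 - (0 + 1) := by ring
      rw [e3, pvALoop_shrink x l ys (ys.length) 0 le_rfl (by omega)]
      rw [show (ys.length : Int) - 1 - 0 = (ys.length : Int) - 1 by ring]
      rw [← one_hundred_sum_array, IH]
termination_by a => a.length
decreasing_by simp

theorem one_hundred_sum_array_spec : Claim_equal_one_hundred_sum_array := by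
  intro array _
  unfold Spec_one_hundred_sum_array
  exact pvMain array
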